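-- pv_equiv track=rewrite | github.com/lptprjh/BUFS_Python-kjh | 0424/0424-02.py | Haekshim
-- ===== SOURCE A (Python) =====
-- def Haekshim(lst):
--     # 연번(0부터 시작)
--     order = list(range(len(lst)))
--     sorted = False
--
--     # 주어진 리스트의 정렬이 완료될 때 까지 반복
--     while sorted is False:
--         sorted = True
--         for i in range(len(lst)-1):
--             # 순서가 어긋난 부분을 발견할 시
--             if lst[i] > lst[i+1]:
--                 # 리스트가 정렬되어 있지 않았음을 표시
--                 sorted = False
--                 # 어긋난 순서를 바로잡음
--                 temp = lst[i]
--                 lst[i] = lst[i+1]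
--                 lst[i+1] = temp
--                 # 연번도 수정
--                 temp = order[i]
--                 order[i] = order[i+1]
--                 order[i+1] = temp
--
--             # 순서는 같으나 연번이 정렬되지 않은 경우
--             if lst[i] == lst[i+1] and order[i] > order[i+1]:
--                 temp = order[i]
--                 order[i] = order[i+1]
--                 order[i+1] = temp
--     #정렬된 숫자와 연번을 튜플로 반환
--     return (lst, order)
-- ===== SOURCE B (Python) =====
-- def Haekshim(lst):
--     # Sort the indices once with Python's stable sort (ties keep original order),
--     # then rebuild the values and write them back in place, like A does.
--     order = sorted(range(len(lst)), key=lambda i: lst[i])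
--     vals = [lst[i] for i in order]
--     lst[:] = vals
--     return (lst, order)
-- ===== Notes on version B (the rewrite author's own statement) =====
-- stated objective: faster
-- what changed: Replaces the repeated bubble-sort passes with adjacent swaps on both lists by a single stable sort of the index list followed by one reconstruction pass written back in place.
import Mathlib
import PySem

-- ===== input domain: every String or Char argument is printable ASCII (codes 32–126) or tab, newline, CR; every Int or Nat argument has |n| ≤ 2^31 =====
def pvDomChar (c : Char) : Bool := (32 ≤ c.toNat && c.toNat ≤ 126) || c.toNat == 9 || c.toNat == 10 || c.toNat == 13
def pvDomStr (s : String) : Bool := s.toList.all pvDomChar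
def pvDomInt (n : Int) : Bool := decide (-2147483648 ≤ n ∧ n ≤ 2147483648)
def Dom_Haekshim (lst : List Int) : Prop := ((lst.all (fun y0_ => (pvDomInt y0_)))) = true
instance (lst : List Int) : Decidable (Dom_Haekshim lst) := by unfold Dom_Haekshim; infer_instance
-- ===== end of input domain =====

-- B replaces A's repeated bubble passes by one stable sort of the index list plus a
-- reconstruction pass (objective: faster). Both A and B mutate the argument list in
-- place in Python (B via lst[:] = vals); the equivalence proved here is about the
-- returned value, which for both is the (sorted values, original indices) pair.

-- ===== PORT A =====
-- one 'for i in range(len(lst)-1)' pass: walks the two lists together, doing the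
-- value swap (first if) and the tie/order swap (second if) exactly as A does;
-- returns (lst, order, sorted-flag of that pass)
def pvPassA : List Int → List Int → List Int × List Int × Bool
  | a :: b :: t, p :: q :: s =>
    if a > b then
      -- first if fires: values and orders swap; the second if then compares b == a, false
      let r := pvPassA (a :: t) (p :: s)
      (b :: r.1, q :: r.2.1, false)
    else if a = b ∧ p > q then
      -- second if fires: only the orders swap
      let r := pvPassA (b :: t) (p :: s)
      (a :: r.1, q :: r.2.1, r.2.2)
    else
      let r := pvPassA (b :: t) (q :: s)
      (a :: r.1, p :: r.2.1, r.2.2)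
  | l, o => (l, o, true)
  termination_by l _ => l.length

-- the 'while sorted is False' loop; the fuel only makes the recursion structural,
-- pvLoopA_fuel_enough below shows the flag is reached before it runs out
def pvLoopA : Nat → List Int → List Int → List Int × List Int
  | 0, l, o => (l, o)
  | fuel + 1, l, o =>
    let r := pvPassA l o
    if r.2.2 then (r.1, r.2.1) else pvLoopA fuel r.1 r.2.1

def Haekshim (lst : List Int) : List Int × List Int :=
  let order := (List.range lst.length).map (fun k => Int.ofNat k)
  pvLoopA (lst.length * lst.length + 1) lst order

-- ===== PORT B =====
def Haekshim_alt (lst : List Int) : List Int × List Int :=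
  let order := PySem.List.sorted ((List.range lst.length).map (fun k => Int.ofNat k))
      (fun i => PySem.List.pyGetD lst i 0)
  let vals := order.map (fun i => PySem.List.pyGetD lst i 0)
  (vals, order)

-- ===== PRECONDITION & SPEC =====
def Spec_Haekshim (lst : List Int) (out : List Int × List Int) : Prop := out = Haekshim_alt lst
instance (lst : List Int) (out : List Int × List Int) : Decidable (Spec_Haekshim lst out) := by unfold Spec_Haekshim; infer_instance

-- ===== CLAIM (what is proved, stated in full; the proofs are below) =====
def Claim_equal_Haekshim : Prop := ∀ (lst : List Int), Dom_Haekshim lst → Spec_Haekshim lst (Haekshim lst)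

-- ===== LEMMAS AND PROOFS =====

-- (value, original index) pairs: the joint state of A's two parallel lists.
-- strict-then-nondecreasing lexicographic order on pairs
def pvR (x y : Int × Int) : Prop := x.1 < y.1 ∨ (x.1 = y.1 ∧ x.2 ≤ y.2)

-- invariant: among equal values, original indices appear in nondecreasing order
def pvE (z : List (Int × Int)) : Prop := z.Pairwise (fun x y => x.1 = y.1 → x.2 ≤ y.2)

-- one bubble pass on the zipped state, mirroring pvPassA
def pvPassP : List (Int × Int) → List (Int × Int) × Bool
  | x :: y :: t =>
    if x.1 > y.1 then
      let r := pvPassP (x :: t)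
      (y :: r.1, false)
    else if x.1 = y.1 ∧ x.2 > y.2 then
      let r := pvPassP ((y.1, x.2) :: t)
      ((x.1, y.2) :: r.1, r.2)
    else
      let r := pvPassP (y :: t)
      (x :: r.1, r.2)
  | l => (l, true)
  termination_by l => l.length

def pvLoopP : Nat → List (Int × Int) → List (Int × Int)
  | 0, z => z
  | fuel + 1, z =>
    let r := pvPassP z
    if r.2 then r.1 else pvLoopP fuel r.1

-- number of out-of-order pairs (the termination measure of the while loop)
def pvViol (x : Int × Int) (t : List (Int × Int)) : Nat :=
  t.countP (fun y => !decide (x.1 < y.1 ∨ (x.1 = y.1 ∧ x.2 ≤ y.2)))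

def pvInv : List (Int × Int) → Nat
  | [] => 0
  | x :: t => pvViol x t + pvInv t

theorem pvR_trans {x y z : Int × Int} (h1 : pvR x y) (h2 : pvR y z) : pvR x z := by
  unfold pvR at *; omega

theorem pvPassP_perm : ∀ z : List (Int × Int), (pvPassP z).1.Perm z := by
  intro z
  induction z using pvPassP.induct with
  | case1 x y t h ih =>
      simp only [pvPassP, if_pos h]
      exact (ih.cons y).trans (List.Perm.swap x y t)
  | case2 x y t h h2 ih =>
      simp only [pvPassP, if_neg h, if_pos h2]
      have hv : x.1 = y.1 := h2.1
      have hperm : ((x.1, y.2) :: (y.1, x.2) :: t).Perm (x :: y :: t) := by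
        have hx : (y.1, x.2) = x := by rw [← hv]
        have hy : (x.1, y.2) = y := by rw [hv]
        rw [hx, hy]
        exact List.Perm.swap x y t
      exact (ih.cons _).trans hperm
  | case3 x y t h h2 ih =>
      simp only [pvPassP, if_neg h, if_neg h2]
      exact ih.cons x
  | case4 l h =>
      cases l with
      | nil => simp [pvPassP]
      | cons a t => cases t with
        | nil => simp [pvPassP]
        | cons b t => exact absurd rfl (fun he => h a b t he)

theorem pvPassP_E : ∀ z : List (Int × Int), pvE z → pvE (pvPassP z).1 := by
  intro z
  induction z using pvPassP.induct with
  | case1 x y t h ih =>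
      intro hE
      simp only [pvPassP, if_pos h]
      rcases (List.pairwise_cons.mp hE) with ⟨hx, hE'⟩
      rcases (List.pairwise_cons.mp hE') with ⟨hy, hEt⟩
      refine List.pairwise_cons.mpr ⟨?_, ?_⟩
      · intro c hc
        rcases List.mem_cons.mp ((pvPassP_perm (x :: t)).mem_iff.mp hc) with hc | hc
        · subst hc; intro hvy; omega
        · exact hy c hc
      · exact ih (List.pairwise_cons.mpr ⟨fun c hc => hx c (List.mem_cons_of_mem _ hc), hEt⟩)
  | case2 x y t h h2 ih =>
      intro hE
      exfalso
      rcases (List.pairwise_cons.mp hE) with ⟨hx, _⟩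
      have := hx y List.mem_cons_self h2.1
      omega
  | case3 x y t h h2 ih =>
      intro hE
      simp only [pvPassP, if_neg h, if_neg h2]
      rcases (List.pairwise_cons.mp hE) with ⟨hx, hE'⟩
      refine List.pairwise_cons.mpr ⟨?_, ih hE'⟩
      intro c hc
      exact hx c ((pvPassP_perm (y :: t)).mem_iff.mp hc)
  | case4 l h =>
      intro hE
      cases l with
      | nil => simpa [pvPassP] using hE
      | cons a t => cases t with
        | nil => simpa [pvPassP] using hE
        | cons b t => exact absurd rfl (fun he => h a b t he)

theorem pvPassP_flag_true : ∀ z : List (Int × Int), pvE z → (pvPassP z).2 = true →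
    (pvPassP z).1 = z ∧ z.Pairwise pvR := by
  intro z
  induction z using pvPassP.induct with
  | case1 x y t h ih =>
      intro _ hf
      simp only [pvPassP, if_pos h] at hf
      exact absurd hf (by decide)
  | case2 x y t h h2 ih =>
      intro hE
      exfalso
      rcases (List.pairwise_cons.mp hE) with ⟨hx, _⟩
      have := hx y List.mem_cons_self h2.1
      omega
  | case3 x y t h h2 ih =>
      intro hE hf
      simp only [pvPassP, if_neg h, if_neg h2] at hf ⊢
      rcases (List.pairwise_cons.mp hE) with ⟨hx, hE'⟩
      rcases ih hE' hf with ⟨heq, hpw⟩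
      have hxy : pvR x y := by
        by_cases hv : x.1 = y.1
        · exact Or.inr ⟨hv, by push Not at h2; omega⟩
        · exact Or.inl (by omega)
      refine ⟨by rw [heq], List.pairwise_cons.mpr ⟨?_, hpw⟩⟩
      intro c hc
      rcases List.mem_cons.mp hc with hc | hc
      · subst hc; exact hxy
      · rcases (List.pairwise_cons.mp hpw) with ⟨hyc, _⟩
        exact pvR_trans hxy (hyc c hc)
  | case4 l h =>
      intro hE _
      cases l with
      | nil => exact ⟨by simp [pvPassP], List.Pairwise.nil⟩
      | cons a t => cases t with
        | nil => exact ⟨by simp [pvPassP], List.pairwise_singleton _ _⟩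
        | cons b t => exact absurd rfl (fun he => h a b t he)

theorem pvViol_perm (x : Int × Int) {t t' : List (Int × Int)} (hp : t.Perm t') :
    pvViol x t = pvViol x t' := hp.countP_eq _

theorem pvViol_cons_pos {x y : Int × Int} (t : List (Int × Int)) (h : pvR x y) :
    pvViol x (y :: t) = pvViol x t := by
  simp only [pvViol, List.countP_cons]
  have h' : (x.1 < y.1 ∨ (x.1 = y.1 ∧ x.2 ≤ y.2)) := h
  simp [h']

theorem pvViol_cons_neg {x y : Int × Int} (t : List (Int × Int)) (h : ¬ pvR x y) :
    pvViol x (y :: t) = pvViol x t + 1 := by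
  simp only [pvViol, List.countP_cons]
  have h' : ¬ (x.1 < y.1 ∨ (x.1 = y.1 ∧ x.2 ≤ y.2)) := h
  simp [h']

theorem pvPassP_inv : ∀ z : List (Int × Int), pvE z →
    pvInv (pvPassP z).1 ≤ pvInv z ∧ ((pvPassP z).2 = false → pvInv (pvPassP z).1 < pvInv z) := by
  intro z
  induction z using pvPassP.induct with
  | case1 x y t h ih =>
      intro hE
      simp only [pvPassP, if_pos h]
      rcases (List.pairwise_cons.mp hE) with ⟨hx, hE'⟩
      rcases (List.pairwise_cons.mp hE') with ⟨_, hEt⟩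
      have hExt : pvE (x :: t) :=
        List.pairwise_cons.mpr ⟨fun c hc => hx c (List.mem_cons_of_mem _ hc), hEt⟩
      rcases ih hExt with ⟨hle, _⟩
      have hyw : pvViol y (pvPassP (x :: t)).1 = pvViol y (x :: t) :=
        pvViol_perm y (pvPassP_perm (x :: t))
      have hRyx : pvR y x := Or.inl (by omega)
      have hNRxy : ¬ pvR x y := by unfold pvR; omega
      have h1 : pvViol y (x :: t) = pvViol y t := pvViol_cons_pos t hRyx
      have h2 : pvViol x (y :: t) = pvViol x t + 1 := pvViol_cons_neg t hNRxy
      simp only [pvInv] at *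
      constructor
      · rw [hyw, h1, h2]; omega
      · intro _; rw [hyw, h1, h2]; omega
  | case2 x y t h h2 ih =>
      intro hE
      exfalso
      rcases (List.pairwise_cons.mp hE) with ⟨hx, _⟩
      have := hx y List.mem_cons_self h2.1
      omega
  | case3 x y t h h2 ih =>
      intro hE
      simp only [pvPassP, if_neg h, if_neg h2]
      rcases (List.pairwise_cons.mp hE) with ⟨hx, hE'⟩
      rcases ih hE' with ⟨hle, hlt⟩
      have hxw : pvViol x (pvPassP (y :: t)).1 = pvViol x (y :: t) :=
        pvViol_perm x (pvPassP_perm (y :: t))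
      have hRxy : pvR x y := by
        by_cases hv : x.1 = y.1
        · exact Or.inr ⟨hv, by push Not at h2; omega⟩
        · exact Or.inl (by omega)
      have h1 : pvViol x (y :: t) = pvViol x t := pvViol_cons_pos t hRxy
      simp only [pvInv] at *
      constructor
      · rw [hxw, h1]; omega
      · intro hf; have := hlt hf; rw [hxw, h1]; omega
  | case4 l h =>
      intro _
      cases l with
      | nil => exact ⟨by simp [pvPassP], fun hf => by simp [pvPassP] at hf⟩
      | cons a t => cases t with
        | nil => exact ⟨by simp [pvPassP], fun hf => by simp [pvPassP] at hf⟩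
        | cons b t => exact absurd rfl (fun he => h a b t he)

theorem pvInv_bound : ∀ z : List (Int × Int), pvInv z ≤ z.length * z.length := by
  intro z
  induction z with
  | nil => simp [pvInv]
  | cons x t ih =>
      have h1 : pvViol x t ≤ t.length := List.countP_le_length ..
      simp only [pvInv, List.length_cons]
      nlinarith

theorem pvLoopP_spec : ∀ (fuel : Nat) (z : List (Int × Int)), pvE z → pvInv z < fuel →
    (pvLoopP fuel z).Perm z ∧ (pvLoopP fuel z).Pairwise pvR := by
  intro fuel
  induction fuel with
  | zero => intro z _ h; omega
  | succ n ih =>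
      intro z hE hfuel
      simp only [pvLoopP]
      by_cases hf : (pvPassP z).2 = true
      · rcases pvPassP_flag_true z hE hf with ⟨heq, hpw⟩
        simp only [hf, if_true]
        rw [heq]
        exact ⟨List.Perm.refl _, hpw⟩
      · simp only [Bool.not_eq_true] at hf
        simp only [hf, Bool.false_eq_true, if_false]
        rcases pvPassP_inv z hE with ⟨_, hlt⟩
        have hlt' := hlt hf
        rcases ih (pvPassP z).1 (pvPassP_E z hE) (by omega) with ⟨hp, hpw⟩
        exact ⟨hp.trans (pvPassP_perm z), hpw⟩

-- bridging: pvPassA on the two lists is pvPassP on their zip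
theorem pvPassA_bridge : ∀ (l o : List Int), l.length = o.length →
    pvPassA l o = ((pvPassP (l.zip o)).1.map Prod.fst,
                   (pvPassP (l.zip o)).1.map Prod.snd,
                   (pvPassP (l.zip o)).2) := by
  intro l o
  induction l, o using pvPassA.induct with
  | case1 a b t p q s h ih =>
      intro hlen
      simp only [pvPassA, if_pos h, List.zip_cons_cons]
      rw [ih (by simpa using hlen)]
      simp only [pvPassP, if_pos (show (a, p).1 > (b, q).1 from h), List.zip_cons_cons]
      simp
  | case2 a b t p q s h h2 ih =>
      intro hlen
      simp only [pvPassA, if_neg h, if_pos h2, List.zip_cons_cons]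
      rw [ih (by simpa using hlen)]
      have hcond : ¬ ((a, p).1 > (b, q).1) := h
      have hcond2 : (a, p).1 = (b, q).1 ∧ (a, p).2 > (b, q).2 := h2
      simp only [pvPassP, if_neg hcond, if_pos hcond2, List.zip_cons_cons]
      simp
  | case3 a b t p q s h h2 ih =>
      intro hlen
      simp only [pvPassA, if_neg h, if_neg h2, List.zip_cons_cons]
      rw [ih (by simpa using hlen)]
      have hcond : ¬ ((a, p).1 > (b, q).1) := h
      have hcond2 : ¬ ((a, p).1 = (b, q).1 ∧ (a, p).2 > (b, q).2) := h2
      simp only [pvPassP, if_neg hcond, if_neg hcond2, List.zip_cons_cons]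
      simp
  | case4 l o h =>
      intro hlen
      match l, o, hlen, h with
      | [], [], _, _ => simp [pvPassA, pvPassP]
      | [a], [p], _, _ => simp [pvPassA, pvPassP]
      | [], _ :: _, hlen, _ => simp at hlen
      | _ :: _, [], hlen, _ => simp at hlen
      | a :: b :: t, [p], hlen, _ => simp at hlen
      | [a], p :: q :: s, hlen, _ => simp at hlen
      | a :: b :: t, p :: q :: s, _, h => exact absurd rfl (fun he => h a b t p q s he rfl)

theorem zip_map_fst_snd' : ∀ (w : List (Int × Int)), (w.map Prod.fst).zip (w.map Prod.snd) = w := by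
  intro w
  induction w with
  | nil => rfl
  | cons x t ih => simp [ih]

theorem pvLoopA_bridge : ∀ (fuel : Nat) (l o : List Int), l.length = o.length →
    pvLoopA fuel l o = ((pvLoopP fuel (l.zip o)).map Prod.fst,
                        (pvLoopP fuel (l.zip o)).map Prod.snd) := by
  intro fuel
  induction fuel with
  | zero =>
      intro l o hlen
      simp only [pvLoopA, pvLoopP]
      exact Prod.ext (List.map_fst_zip (le_of_eq hlen)).symm
        (List.map_snd_zip (le_of_eq hlen.symm)).symm
  | succ n ih =>
      intro l o hlen
      simp only [pvLoopA, pvLoopP, pvPassA_bridge l o hlen]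
      by_cases hf : (pvPassP (l.zip o)).2 = true
      · simp [hf]
      · simp only [Bool.not_eq_true] at hf
        simp only [hf, Bool.false_eq_true, if_false]
        rw [ih _ _ (by simp), zip_map_fst_snd']

-- the initial pair list: lst zipped with 0..n-1
theorem zip_range_eq_map (lst : List Int) :
    lst.zip ((List.range lst.length).map (fun k => Int.ofNat k)) =
      ((List.range lst.length).map (fun k => Int.ofNat k)).map
        (fun i => (PySem.List.pyGetD lst i 0, i)) := by
  apply List.ext_getElem
  · simp
  · intro k h1 h2
    have hk : k < lst.length := by simpa using h1
    rw [List.getElem_zip, List.getElem_map, List.getElem_map, List.getElem_map,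
      List.getElem_range]
    show _ = (PySem.List.pyGetD lst ((k : Nat) : Int) 0, _)
    rw [PySem.List.pyGetD_natCast, List.getD_eq_getElem _ _ hk]

-- stability of PySem's sort: on a strictly increasing input list, ties keep input order
theorem pvInsertBy_stable (key : Int → Int) :
    ∀ (ys : List Int) (x : Int),
      ys.Pairwise (fun a b => key a < key b ∨ (key a = key b ∧ a < b)) →
      (∀ y ∈ ys, y < x) →
      (PySem.List.insertBy (fun a b => decide (key a < key b)) x ys).Pairwise
        (fun a b => key a < key b ∨ (key a = key b ∧ a < b)) := by
  intro ys
  induction ys with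
  | nil => intro x _ _; simp [PySem.List.insertBy]
  | cons y t ih =>
      intro x hpw hlt
      rcases List.pairwise_cons.mp hpw with ⟨hy, hpt⟩
      simp only [PySem.List.insertBy]
      by_cases hk : key x < key y
      · simp only [hk, decide_true, if_true]
        refine List.pairwise_cons.mpr ⟨?_, hpw⟩
        intro c hc
        rcases List.mem_cons.mp hc with hc | hc
        · subst hc; exact Or.inl hk
        · rcases hy c hc with h | ⟨h, _⟩
          · exact Or.inl (hk.trans h)
          · exact Or.inl (h ▸ hk)
      · simp only [hk, decide_false, Bool.false_eq_true, if_false]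
        refine List.pairwise_cons.mpr ⟨?_, ?_⟩
        · intro c hc
          rcases (PySem.List.mem_insertBy _ x c t).mp hc with hc | hc
          · rw [hc]
            by_cases he : key y = key x
            · exact Or.inr ⟨he, hlt y List.mem_cons_self⟩
            · exact Or.inl (by omega)
          · exact hy c hc
        · exact ih x hpt (fun c hc => hlt c (List.mem_cons_of_mem _ hc))

theorem pvSorted_stable (key : Int → Int) (xs : List Int) (hxs : xs.Pairwise (· < ·)) :
    (PySem.List.sorted xs key).Pairwise
      (fun a b => key a < key b ∨ (key a = key b ∧ a < b)) := by
  rw [PySem.List.sorted_eq_foldl_insertBy]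
  suffices h : ∀ (l acc : List Int),
      acc.Pairwise (fun a b => key a < key b ∨ (key a = key b ∧ a < b)) →
      (∀ a ∈ acc, ∀ x ∈ l, a < x) → l.Pairwise (· < ·) →
      (l.foldl (fun acc x => PySem.List.insertBy (fun a b => decide (key a < key b)) x acc)
        acc).Pairwise (fun a b => key a < key b ∨ (key a = key b ∧ a < b)) by
    exact h xs [] List.Pairwise.nil (by simp) hxs
  intro l
  induction l with
  | nil => intro acc h _ _; simpa using h
  | cons x t ih =>
      intro acc hacc hcross hl
      rcases List.pairwise_cons.mp hl with ⟨hx, ht⟩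
      simp only [List.foldl_cons]
      apply ih
      · exact pvInsertBy_stable key acc x hacc
          (fun a ha => hcross a ha x List.mem_cons_self)
      · intro a ha x' hx'
        rcases (PySem.List.mem_insertBy _ x a acc).mp ha with ha | ha
        · subst ha; exact hx x' hx'
        · exact hcross a ha x' (List.mem_cons_of_mem _ hx')
      · exact ht

theorem pvR_antisymm : ∀ a b : Int × Int, pvR a b → pvR b a → a = b := by
  intro a b h1 h2
  rcases a with ⟨a1, a2⟩; rcases b with ⟨b1, b2⟩
  unfold pvR at *
  simp only at h1 h2
  have e1 : a1 = b1 := by omega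
  have e2 : a2 = b2 := by omega
  rw [e1, e2]

-- ===== VERDICT (by name: the statement is the Claim_ definition above) =====
theorem Haekshim_spec : Claim_equal_Haekshim := by
  intro lst _
  unfold Spec_Haekshim Haekshim Haekshim_alt
  set n := lst.length with hn
  set idxs : List Int := (List.range n).map (fun k => Int.ofNat k) with hidxs
  set g : Int → Int := fun i => PySem.List.pyGetD lst i 0 with hg
  set f : Int → Int × Int := fun i => (g i, i) with hf
  set P : List (Int × Int) := lst.zip idxs with hP
  have hPmap : P = idxs.map f := zip_range_eq_map lst
  have hlen : lst.length = idxs.length := by rw [hidxs]; simp [hn]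
  have hidxs_lt : idxs.Pairwise (· < ·) := by
    rw [hidxs, List.pairwise_map]
    exact List.pairwise_lt_range.imp (fun h => Int.ofNat_lt.mpr h)
  -- A's side
  have hEP : pvE P := by
    rw [hPmap]; unfold pvE; rw [List.pairwise_map]
    exact hidxs_lt.imp (fun h => fun _ => le_of_lt h)
  have hPlen : P.length ≤ n := by
    rw [hPmap, hidxs]; simp
  have hfuel : pvInv P < n * n + 1 := by
    have h1 := pvInv_bound P
    have h2 : P.length * P.length ≤ n * n := Nat.mul_le_mul hPlen hPlen
    omega
  rcases pvLoopP_spec (n * n + 1) P hEP hfuel with ⟨hperm, hpw⟩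
  set W := pvLoopP (n * n + 1) P with hW
  -- B's side
  set order := PySem.List.sorted idxs g with horder
  set Zb : List (Int × Int) := order.map f with hZb
  have hZperm : Zb.Perm P := by
    rw [hZb, hPmap]
    exact (PySem.List.sorted_perm idxs g false).map f
  have hZpw : Zb.Pairwise pvR := by
    rw [hZb, List.pairwise_map]
    exact (pvSorted_stable g idxs hidxs_lt).imp
      (fun h => by
        rcases h with h | ⟨h, h'⟩
        · exact Or.inl h
        · exact Or.inr ⟨h, le_of_lt h'⟩)
  -- uniqueness of the pvR-sorted permutation
  have hWZ : W = Zb :=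
    List.Perm.eq_of_pairwise (fun a b _ _ => pvR_antisymm a b) hpw hZpw
      (hperm.trans hZperm.symm)
  rw [pvLoopA_bridge (n * n + 1) lst idxs hlen, ← hP, ← hW, hWZ, hZb]
  simp [hf, hg, Function.comp_def]
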